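-- pv_equiv track=rewrite | github.com/minghui-liu/cold-compress | generate_dev.py | escape_llama_tags
-- ===== SOURCE A (Python) =====
-- def escape_llama_tags(text):
--     """
--     Escapes Llama turn tags within a given string by replacing them with escaped versions.
--
--     Args:
--     text (str): The input string potentially containing Llama turn tags.
--
--     Returns:
--     str: The string with Llama turn tags replaced by their escaped versions.
--     """
--     # replacements = {
--     #     "<|begin_of_text|>": "\\<|begin_of_text|>",
--     #     "<|end_of_text|>": "\\<|end_of_text|>",
--     #     "<|eot_id|>": "\\<|eot_id|>",
--     #     "<|start_header_id|>": "\\<|start_header_id|>",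
--     #     "<|end_header_id|>": "\\<|end_header_id|>"
--     # }
--     replacements = {
--         "<|begin_of_text|>": "[begin of text]",
--         "<|end_of_text|>": "[end of text]",
--         "<|eot_id|>": "[eot id]",
--         "<|start_header_id|>": "[start header id]",
--         "<|end_header_id|>": "[end header id]"
--     }
--
--     for old_tag, escaped_tag in replacements.items():
--         text = text.replace(old_tag, escaped_tag)
--     return text
-- ===== SOURCE B (Python) =====
-- def escape_llama_tags(text):
--     """Single left-to-right scan: at each position emit the escaped form of the
--     tag starting there (if any) and skip it, else copy the character."""
--     replacements = {
--         "<|begin_of_text|>": "[begin of text]",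
--         "<|end_of_text|>": "[end of text]",
--         "<|eot_id|>": "[eot id]",
--         "<|start_header_id|>": "[start header id]",
--         "<|end_header_id|>": "[end header id]"
--     }
--     out = []
--     i = 0
--     n = len(text)
--     while i < n:
--         for tag, esc in replacements.items():
--             if text.startswith(tag, i):
--                 out.append(esc)
--                 i += len(tag)
--                 break
--         else:
--             out.append(text[i])
--             i += 1
--     return "".join(out)
-- ===== Notes on version B (the rewrite author's own statement) =====
-- stated objective: alternative
-- what changed: A runs five sequential whole-string str.replace passes (one per tag); B makes a single left-to-right scan that at each position looks up the tag starting there in the replacements table, emits its escaped form and skips it, copying other characters.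
import Mathlib
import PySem

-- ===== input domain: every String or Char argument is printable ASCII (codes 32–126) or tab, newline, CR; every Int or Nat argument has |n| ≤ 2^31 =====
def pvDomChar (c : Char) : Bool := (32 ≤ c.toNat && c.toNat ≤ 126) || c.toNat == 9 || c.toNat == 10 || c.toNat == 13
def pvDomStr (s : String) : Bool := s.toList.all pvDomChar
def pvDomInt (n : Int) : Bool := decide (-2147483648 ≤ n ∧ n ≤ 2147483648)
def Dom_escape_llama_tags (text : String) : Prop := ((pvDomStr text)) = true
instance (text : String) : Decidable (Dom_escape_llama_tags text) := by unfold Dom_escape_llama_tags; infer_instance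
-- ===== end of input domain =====

-- B replaces A's five sequential whole-string `str.replace` passes by one left-to-right
-- scan that, at each position, looks the tag starting there up in the table (objective:
-- alternative single-pass algorithm, same result).

-- ===== PORT A =====
-- A: dict of replacements, then one full-string `str.replace` pass per entry.
def escape_llama_tags (text : String) : String :=
  let replacements : PySem.Dict String String :=
    PySem.Dict.ofList
      [("<|begin_of_text|>", "[begin of text]"),
       ("<|end_of_text|>", "[end of text]"),
       ("<|eot_id|>", "[eot id]"),
       ("<|start_header_id|>", "[start header id]"),
       ("<|end_header_id|>", "[end header id]")]
  replacements.items.foldl (fun t p => PySem.Str.replace t p.1 p.2) text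

-- ===== PORT B =====
-- the replacements table of Source B, as (tag, escaped) pairs over code points
def pvTags : List (List Char × List Char) :=
  [("<|begin_of_text|>".toList, "[begin of text]".toList),
   ("<|end_of_text|>".toList, "[end of text]".toList),
   ("<|eot_id|>".toList, "[eot id]".toList),
   ("<|start_header_id|>".toList, "[start header id]".toList),
   ("<|end_header_id|>".toList, "[end header id]".toList)]

-- Source B's while-loop: at the current position, the first table entry whose tag starts
-- there (the for/else) is emitted escaped and skipped; otherwise the character is copied.
def pvScan (cs : List Char) : List Char :=
  match hf : pvTags.find? (fun p => p.1.isPrefixOf cs) with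
  | some p => p.2 ++ pvScan (cs.drop p.1.length)
  | none =>
    match cs with
    | [] => []
    | c :: t => c :: pvScan t
termination_by cs.length
decreasing_by
  · have hmem := List.mem_of_find?_eq_some hf
    have hpre : p.1 <+: cs := List.isPrefixOf_iff_prefix.mp (by simpa using List.find?_some hf)
    have h1 : 1 ≤ p.1.length := by
      simp only [pvTags, List.mem_cons, List.not_mem_nil, or_false] at hmem
      rcases hmem with rfl | rfl | rfl | rfl | rfl <;> decide
    have h2 : p.1.length ≤ cs.length := hpre.length_le
    simp only [List.length_drop]
    omega
  · simp

def escape_llama_tags_alt (text : String) : String :=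
  String.ofList (pvScan text.toList)

-- ===== PRECONDITION & SPEC =====
def Spec_escape_llama_tags (text : String) (out : String) : Prop := out = escape_llama_tags_alt text
instance (text : String) (out : String) : Decidable (Spec_escape_llama_tags text out) := by unfold Spec_escape_llama_tags; infer_instance

-- ===== CLAIM (what is proved, stated in full; the proofs are below) =====
def Claim_equal_escape_llama_tags : Prop := ∀ (text : String), Dom_escape_llama_tags text → Spec_escape_llama_tags text (escape_llama_tags text)

-- ===== LEMMAS AND PROOFS =====

-- short names for the five tags and their escaped forms, as char lists
def t1c : List Char := "<|begin_of_text|>".toList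
def r1c : List Char := "[begin of text]".toList
def t2c : List Char := "<|end_of_text|>".toList
def r2c : List Char := "[end of text]".toList
def t3c : List Char := "<|eot_id|>".toList
def r3c : List Char := "[eot id]".toList
def t4c : List Char := "<|start_header_id|>".toList
def r4c : List Char := "[start header id]".toList
def t5c : List Char := "<|end_header_id|>".toList
def r5c : List Char := "[end header id]".toList

-- A's value on char lists: the five replace passes composed, in dict order
def comp5 (cs : List Char) : List Char :=
  PySem.Chars.replace (PySem.Chars.replace (PySem.Chars.replace (PySem.Chars.replace
    (PySem.Chars.replace cs t1c r1c) t2c r2c) t3c r3c) t4c r4c) t5c r5c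

lemma pvTags_eq : pvTags = [(t1c, r1c), (t2c, r2c), (t3c, r3c), (t4c, r4c), (t5c, r5c)] := rfl

-- the accumulator of replace.go is a pure prefix, provided the fuel is sufficient
lemma go_acc (old new : List Char) (hne : old ≠ []) :
    ∀ (fuel : Nat) (l acc : List Char), l.length ≤ fuel →
      PySem.Chars.replace.go old new fuel l acc
        = acc.reverse ++ PySem.Chars.replace.go old new l.length l [] := by
  intro fuel
  induction fuel using Nat.strong_induction_on with
  | _ fuel IH =>
    intro l acc hl
    match fuel, l with
    | 0, l =>
      have : l = [] := List.length_eq_zero_iff.mp (Nat.le_zero.mp hl)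
      subst this
      simp [PySem.Chars.replace.go]
    | f + 1, [] => simp [PySem.Chars.replace.go]
    | f + 1, c :: t =>
      have hold : 1 ≤ old.length := by
        cases old with
        | nil => exact absurd rfl hne
        | cons _ _ => simp
      have hl' : t.length ≤ f := by simpa using hl
      have hdl : (List.drop old.length (c :: t)).length ≤ t.length := by
        simp only [List.length_drop, List.length_cons]; omega
      rw [PySem.Chars.replace.go]
      have hrhs : PySem.Chars.replace.go old new (c :: t).length (c :: t) ([] : List Char)
          = if old.isPrefixOf (c :: t)
            then PySem.Chars.replace.go old new t.length (List.drop old.length (c :: t)) (new.reverse ++ [])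
            else PySem.Chars.replace.go old new t.length t (c :: []) := by
        rw [show (c :: t).length = t.length + 1 from by simp, PySem.Chars.replace.go]
      rw [hrhs]
      by_cases hp : old.isPrefixOf (c :: t)
      · rw [if_pos hp, if_pos hp]
        rw [IH f (Nat.lt_succ_self f) _ _ (le_trans hdl hl')]
        rw [IH t.length (by omega) _ _ hdl]
        simp
      · rw [if_neg hp, if_neg hp]
        rw [IH f (Nat.lt_succ_self f) _ _ hl']
        rw [IH t.length (by omega) t [c] le_rfl]
        simp

lemma rep_nil (old new : List Char) (hne : old ≠ []) :
    PySem.Chars.replace [] old new = [] := by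
  have hE : old.isEmpty = false := by simpa using hne
  simp [PySem.Chars.replace, hE, PySem.Chars.replace.go]

lemma rep_prefix (old new l : List Char) (hne : old ≠ []) (hp : old <+: l) :
    PySem.Chars.replace l old new
      = new ++ PySem.Chars.replace (l.drop old.length) old new := by
  have hE : old.isEmpty = false := by simpa using hne
  cases l with
  | nil => exact absurd (List.prefix_nil.mp hp) hne
  | cons c t =>
    have hb : old.isPrefixOf (c :: t) = true := List.isPrefixOf_iff_prefix.mpr hp
    have hold : 1 ≤ old.length := by
      cases old with
      | nil => exact absurd rfl hne
      | cons _ _ => simp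
    have hdl : (List.drop old.length (c :: t)).length ≤ t.length := by
      simp only [List.length_drop, List.length_cons]; omega
    simp only [PySem.Chars.replace, hE, Bool.false_eq_true, if_false, List.length_cons]
    rw [PySem.Chars.replace.go, if_pos hb]
    rw [go_acc old new hne t.length _ _ hdl]
    simp

lemma rep_copy (old new : List Char) (c : Char) (t : List Char)
    (hne : old ≠ []) (hp : ¬ old <+: (c :: t)) :
    PySem.Chars.replace (c :: t) old new = c :: PySem.Chars.replace t old new := by
  have hE : old.isEmpty = false := by simpa using hne
  have hb : old.isPrefixOf (c :: t) = false :=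
    Bool.eq_false_iff.mpr (fun h => hp (List.isPrefixOf_iff_prefix.mp h))
  simp only [PySem.Chars.replace, hE, Bool.false_eq_true, if_false, List.length_cons]
  rw [PySem.Chars.replace.go, hb]
  simp only [Bool.false_eq_true, if_false]
  rw [go_acc old new hne t.length t _ le_rfl]
  simp

-- a block in which no occurrence of `old` starts passes through replace untouched
lemma inert (old new p X : List Char) (hne : old ≠ [])
    (hp : ∀ j, j < p.length → ¬ old <+: ((p ++ X).drop j)) :
    PySem.Chars.replace (p ++ X) old new = p ++ PySem.Chars.replace X old new := by
  induction p with
  | nil => simp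
  | cons a p' IH =>
    have h0 : ¬ old <+: (a :: (p' ++ X)) := by
      have := hp 0 (by simp)
      simpa using this
    rw [List.cons_append, rep_copy old new a (p' ++ X) hne h0]
    rw [IH (fun j hj hpre => by
      have := hp (j + 1) (by simp; omega)
      simp only [List.cons_append, List.drop_succ_cons] at this
      exact this hpre)]
    simp

-- the usable form: `old` starts with '<', the block has no interior '<', and
-- neither of block/old is a prefix of the other
lemma inert' (old new p X : List Char) (hne : old ≠ []) (hh : old.head? = some '<')
    (h1 : ¬ old <+: p) (h2 : ¬ p <+: old) (hmid : '<' ∉ p.drop 1) :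
    PySem.Chars.replace (p ++ X) old new = p ++ PySem.Chars.replace X old new := by
  apply inert old new p X hne
  intro j hj hpre
  rcases Nat.eq_zero_or_pos j with rfl | hj0
  · simp only [List.drop_zero] at hpre
    by_cases hle : old.length ≤ p.length
    · exact h1 (List.prefix_of_prefix_length_le hpre (List.prefix_append p X) hle)
    · exact h2 (List.prefix_of_prefix_length_le (List.prefix_append p X) hpre (by omega))
  · have hhead : ((p ++ X).drop j).head? = some '<' := by
      obtain ⟨o, ot, rfl⟩ : ∃ o ot, old = o :: ot := by
        cases old with
        | nil => exact absurd rfl hne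
        | cons o ot => exact ⟨o, ot, rfl⟩
      obtain ⟨w, hw⟩ := hpre
      have ho : o = '<' := by simpa using hh
      rw [← hw, ho]
      simp
    rw [List.head?_drop, List.getElem?_append_left hj] at hhead
    apply hmid
    exact List.mem_of_getElem? (by
      rw [List.getElem?_drop, show 1 + (j - 1) = j from by omega]
      exact hhead)

-- a prefix of the output of a replace pass that ends in '>' and avoids '[' was
-- already a prefix of the input (the tags end in '>', the escaped forms add '[')
lemma pullback (old new : List Char) (hne : old ≠ []) (hgt : '>' ∉ new) (hlb : '[' ∈ new) :
    ∀ (X u : List Char), u ≠ [] → u.getLast? = some '>' → '[' ∉ u →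
      u <+: PySem.Chars.replace X old new → u <+: X := by
  intro X
  induction X with
  | nil =>
    intro u hu _ _ hp
    rw [rep_nil old new hne] at hp
    exact absurd (List.prefix_nil.mp hp) hu
  | cons x X' IH =>
    intro u hu hlast hnb hp
    by_cases hpre : old <+: (x :: X')
    · rw [rep_prefix old new _ hne hpre] at hp
      by_cases hle : u.length ≤ new.length
      · have hun : u <+: new := List.prefix_of_prefix_length_le hp (List.prefix_append new _) hle
        exact absurd (hun.subset (List.mem_of_getLast? hlast)) hgt
      · have hnu : new <+: u := List.prefix_of_prefix_length_le (List.prefix_append new _) hp (by omega)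
        exact absurd (hnu.subset hlb) hnb
    · rw [rep_copy old new x X' hne hpre] at hp
      cases u with
      | nil => exact absurd rfl hu
      | cons y u' =>
        obtain ⟨rfl, hp'⟩ := List.cons_prefix_cons.mp hp
        rcases eq_or_ne u' [] with rfl | hu'
        · exact List.cons_prefix_cons.mpr ⟨rfl, List.nil_prefix⟩
        · have hlast' : u'.getLast? = some '>' := by
            cases u' with
            | nil => exact absurd rfl hu'
            | cons b t => simpa [List.getLast?_cons_cons] using hlast
          have hres := IH u' hu' hlast' (fun h => hnb (List.mem_cons_of_mem _ h)) hp'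
          exact List.cons_prefix_cons.mpr ⟨rfl, hres⟩

lemma comp5_nil : comp5 [] = [] := by
  rw [comp5, rep_nil t1c r1c (by decide), rep_nil t2c r2c (by decide),
      rep_nil t3c r3c (by decide), rep_nil t4c r4c (by decide), rep_nil t5c r5c (by decide)]

-- decomposition: when a tag heads the string, A's five passes emit its escaped form
lemma decomp1 (rest : List Char) : comp5 (t1c ++ rest) = r1c ++ comp5 rest := by
  rw [comp5, comp5]
  rw [rep_prefix t1c r1c _ (by decide) (List.prefix_append t1c rest), List.drop_left]
  rw [inert' t2c r2c r1c _ (by decide) (by decide) (by decide) (by decide) (by decide)]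
  rw [inert' t3c r3c r1c _ (by decide) (by decide) (by decide) (by decide) (by decide)]
  rw [inert' t4c r4c r1c _ (by decide) (by decide) (by decide) (by decide) (by decide)]
  rw [inert' t5c r5c r1c _ (by decide) (by decide) (by decide) (by decide) (by decide)]

lemma decomp2 (rest : List Char) : comp5 (t2c ++ rest) = r2c ++ comp5 rest := by
  rw [comp5, comp5]
  rw [inert' t1c r1c t2c _ (by decide) (by decide) (by decide) (by decide) (by decide)]
  rw [rep_prefix t2c r2c _ (by decide) (List.prefix_append t2c _), List.drop_left]
  rw [inert' t3c r3c r2c _ (by decide) (by decide) (by decide) (by decide) (by decide)]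
  rw [inert' t4c r4c r2c _ (by decide) (by decide) (by decide) (by decide) (by decide)]
  rw [inert' t5c r5c r2c _ (by decide) (by decide) (by decide) (by decide) (by decide)]

lemma decomp3 (rest : List Char) : comp5 (t3c ++ rest) = r3c ++ comp5 rest := by
  rw [comp5, comp5]
  rw [inert' t1c r1c t3c _ (by decide) (by decide) (by decide) (by decide) (by decide)]
  rw [inert' t2c r2c t3c _ (by decide) (by decide) (by decide) (by decide) (by decide)]
  rw [rep_prefix t3c r3c _ (by decide) (List.prefix_append t3c _), List.drop_left]
  rw [inert' t4c r4c r3c _ (by decide) (by decide) (by decide) (by decide) (by decide)]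
  rw [inert' t5c r5c r3c _ (by decide) (by decide) (by decide) (by decide) (by decide)]

lemma decomp4 (rest : List Char) : comp5 (t4c ++ rest) = r4c ++ comp5 rest := by
  rw [comp5, comp5]
  rw [inert' t1c r1c t4c _ (by decide) (by decide) (by decide) (by decide) (by decide)]
  rw [inert' t2c r2c t4c _ (by decide) (by decide) (by decide) (by decide) (by decide)]
  rw [inert' t3c r3c t4c _ (by decide) (by decide) (by decide) (by decide) (by decide)]
  rw [rep_prefix t4c r4c _ (by decide) (List.prefix_append t4c _), List.drop_left]
  rw [inert' t5c r5c r4c _ (by decide) (by decide) (by decide) (by decide) (by decide)]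

lemma decomp5 (rest : List Char) : comp5 (t5c ++ rest) = r5c ++ comp5 rest := by
  rw [comp5, comp5]
  rw [inert' t1c r1c t5c _ (by decide) (by decide) (by decide) (by decide) (by decide)]
  rw [inert' t2c r2c t5c _ (by decide) (by decide) (by decide) (by decide) (by decide)]
  rw [inert' t3c r3c t5c _ (by decide) (by decide) (by decide) (by decide) (by decide)]
  rw [inert' t4c r4c t5c _ (by decide) (by decide) (by decide) (by decide) (by decide)]
  rw [rep_prefix t5c r5c _ (by decide) (List.prefix_append t5c _), List.drop_left]

-- copy step: when no tag heads the string, all five passes copy the first character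
lemma copy5 (c : Char) (t : List Char)
    (h1 : ¬ t1c <+: (c :: t)) (h2 : ¬ t2c <+: (c :: t)) (h3 : ¬ t3c <+: (c :: t))
    (h4 : ¬ t4c <+: (c :: t)) (h5 : ¬ t5c <+: (c :: t)) :
    comp5 (c :: t) = c :: comp5 t := by
  have pb1 := pullback t1c r1c (by decide) (by decide) (by decide)
  have pb2 := pullback t2c r2c (by decide) (by decide) (by decide)
  have pb3 := pullback t3c r3c (by decide) (by decide) (by decide)
  have pb4 := pullback t4c r4c (by decide) (by decide) (by decide)
  rw [comp5, comp5]
  have e1 := rep_copy t1c r1c c t (by decide) h1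
  rw [e1]
  have n2 : ¬ t2c <+: (c :: PySem.Chars.replace t t1c r1c) := by
    intro hp
    rw [← e1] at hp
    exact h2 (pb1 _ t2c (by decide) (by decide) (by decide) hp)
  have e2 := rep_copy t2c r2c c _ (by decide) n2
  rw [e2]
  have n3 : ¬ t3c <+: (c :: PySem.Chars.replace (PySem.Chars.replace t t1c r1c) t2c r2c) := by
    intro hp
    rw [← e2, ← e1] at hp
    exact h3 (pb1 _ t3c (by decide) (by decide) (by decide)
      (pb2 _ t3c (by decide) (by decide) (by decide) hp))
  have e3 := rep_copy t3c r3c c _ (by decide) n3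
  rw [e3]
  have n4 : ¬ t4c <+: (c :: PySem.Chars.replace (PySem.Chars.replace
      (PySem.Chars.replace t t1c r1c) t2c r2c) t3c r3c) := by
    intro hp
    rw [← e3, ← e2, ← e1] at hp
    exact h4 (pb1 _ t4c (by decide) (by decide) (by decide)
      (pb2 _ t4c (by decide) (by decide) (by decide)
        (pb3 _ t4c (by decide) (by decide) (by decide) hp)))
  have e4 := rep_copy t4c r4c c _ (by decide) n4
  rw [e4]
  have n5 : ¬ t5c <+: (c :: PySem.Chars.replace (PySem.Chars.replace (PySem.Chars.replace
      (PySem.Chars.replace t t1c r1c) t2c r2c) t3c r3c) t4c r4c) := by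
    intro hp
    rw [← e4, ← e3, ← e2, ← e1] at hp
    exact h5 (pb1 _ t5c (by decide) (by decide) (by decide)
      (pb2 _ t5c (by decide) (by decide) (by decide)
        (pb3 _ t5c (by decide) (by decide) (by decide)
          (pb4 _ t5c (by decide) (by decide) (by decide) hp))))
  rw [rep_copy t5c r5c c _ (by decide) n5]

lemma main_aux : ∀ (n : Nat) (cs : List Char), cs.length ≤ n → comp5 cs = pvScan cs := by
  intro n
  induction n with
  | zero =>
    intro cs h
    have : cs = [] := List.length_eq_zero_iff.mp (Nat.le_zero.mp h)
    subst this
    rw [pvScan, comp5_nil]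
    rfl
  | succ n IH =>
    intro cs hlen
    rw [pvScan]
    split
    · next p heq =>
      have hmem := List.mem_of_find?_eq_some heq
      have hpre : p.1 <+: cs := List.isPrefixOf_iff_prefix.mp (by simpa using List.find?_some heq)
      rw [pvTags_eq] at hmem
      simp only [List.mem_cons, List.not_mem_nil, or_false] at hmem
      rcases hmem with rfl | rfl | rfl | rfl | rfl <;>
        · obtain ⟨rest, rfl⟩ := hpre
          dsimp only at hlen ⊢
          rw [List.drop_left]
          first
            | rw [decomp1 rest] | rw [decomp2 rest] | rw [decomp3 rest]
            | rw [decomp4 rest] | rw [decomp5 rest]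
          congr 1
          apply IH
          rw [List.length_append] at hlen
          have hpos : 1 ≤ t1c.length ∧ 1 ≤ t2c.length ∧ 1 ≤ t3c.length ∧
              1 ≤ t4c.length ∧ 1 ≤ t5c.length := by decide
          obtain ⟨g1, g2, g3, g4, g5⟩ := hpos
          omega
    · next heq =>
      have hnone := List.find?_eq_none.mp heq
      cases cs with
      | nil => exact comp5_nil
      | cons c t =>
        have hk : ∀ pr ∈ pvTags, ¬ pr.1 <+: (c :: t) := by
          intro pr hpr hp
          exact absurd (List.isPrefixOf_iff_prefix.mpr hp) (by simpa using hnone pr hpr)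
        rw [copy5 c t
          (hk (t1c, r1c) (by rw [pvTags_eq]; simp))
          (hk (t2c, r2c) (by rw [pvTags_eq]; simp))
          (hk (t3c, r3c) (by rw [pvTags_eq]; simp))
          (hk (t4c, r4c) (by rw [pvTags_eq]; simp))
          (hk (t5c, r5c) (by rw [pvTags_eq]; simp))]
        congr 1
        exact IH t (by simpa using Nat.le_of_succ_le_succ hlen)

lemma comp5_eq_pvScan (cs : List Char) : comp5 cs = pvScan cs :=
  main_aux cs.length cs le_rfl

lemma A_eq_comp5 (text : String) :
    escape_llama_tags text = String.ofList (comp5 text.toList) := by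
  have hitems : (PySem.Dict.ofList
      [("<|begin_of_text|>", "[begin of text]"),
       ("<|end_of_text|>", "[end of text]"),
       ("<|eot_id|>", "[eot id]"),
       ("<|start_header_id|>", "[start header id]"),
       ("<|end_header_id|>", "[end header id]")] : PySem.Dict String String).items
      = [("<|begin_of_text|>", "[begin of text]"),
         ("<|end_of_text|>", "[end of text]"),
         ("<|eot_id|>", "[eot id]"),
         ("<|start_header_id|>", "[start header id]"),
         ("<|end_header_id|>", "[end header id]")] := by decide
  simp [escape_llama_tags, hitems, comp5, PySem.Str.replace,
    t1c, t2c, t3c, t4c, t5c, r1c, r2c, r3c, r4c, r5c]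

-- ===== VERDICT (by name: the statement is the Claim_ definition above) =====
theorem escape_llama_tags_spec : Claim_equal_escape_llama_tags := by
  intro text _
  show escape_llama_tags text = escape_llama_tags_alt text
  rw [A_eq_comp5, escape_llama_tags_alt, comp5_eq_pvScan]
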